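-- pv_equiv track=rewrite | github.com/berica22/UTN-TUPaD-P1 | 05 Funciones/lenguaje_natural.py | similitud_media
-- ===== SOURCE A (Python) =====
-- def similitud_media(conjuntos):
--     # Calcular la intersección de todos los conjuntos
--     interseccion = set(conjuntos[0])
--     for conjunto in conjuntos[1:]:
--         interseccion = interseccion & conjunto
--
--     # Verificar si la intersección tiene al menos 2 elementos
--     if len(interseccion) >= 2:
--         return True
--     else:
--         return False
-- ===== SOURCE B (Python) =====
-- def similitud_media(conjuntos):
--     # Scan the first set once, counting elements present in every other set;
--     # stop as soon as two common elements are found. No intermediate sets built.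
--     primero = conjuntos[0]
--     resto = conjuntos[1:]
--     comunes = 0
--     for x in primero:
--         if all(x in c for c in resto):
--             comunes += 1
--             if comunes == 2:
--                 return True
--     return False
-- ===== Notes on version B (the rewrite author's own statement) =====
-- stated objective: alternative
-- what changed: B builds no intermediate intersection sets: it scans the first set once, counting elements contained in every other set, and returns True as soon as two common elements are found (early exit), instead of folding pairwise set intersections and measuring the final set.
-- outside the precondition, e.g. on similitud_media([]): A raises IndexError, B raises IndexError
import Mathlib
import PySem

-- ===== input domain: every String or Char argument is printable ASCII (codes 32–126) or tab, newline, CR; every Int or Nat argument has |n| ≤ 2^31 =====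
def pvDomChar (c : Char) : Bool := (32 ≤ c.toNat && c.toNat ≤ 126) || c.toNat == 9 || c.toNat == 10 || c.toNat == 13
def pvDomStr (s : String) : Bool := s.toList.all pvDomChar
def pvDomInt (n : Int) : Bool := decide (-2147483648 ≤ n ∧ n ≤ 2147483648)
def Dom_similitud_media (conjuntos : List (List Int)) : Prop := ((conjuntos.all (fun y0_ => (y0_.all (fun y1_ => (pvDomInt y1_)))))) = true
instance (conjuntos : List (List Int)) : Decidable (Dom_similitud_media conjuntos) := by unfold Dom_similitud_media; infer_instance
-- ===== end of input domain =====

-- B scans the first set once, counting elements contained in every other set, with an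
-- early exit at two common elements; it builds no intermediate intersection sets.
-- Equivalence is claimed for the return value on nonempty input (on [] both raise IndexError).

-- ===== PORT A =====
-- interseccion = set(conjuntos[0]); for conjunto in conjuntos[1:]: interseccion = interseccion & conjunto
-- return len(interseccion) >= 2
def similitud_media (conjuntos : List (List Int)) : Bool :=
  match conjuntos with
  | [] => false  -- conjuntos[0] raises IndexError here; excluded by Pre_
  | h :: t =>    -- h = conjuntos[0], t = conjuntos[1:]
    let interseccion :=
      t.foldl (fun acc conjunto => PySem.Set.inter acc conjunto) (PySem.Set.ofList h)
    decide (2 ≤ PySem.Set.len interseccion)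

-- ===== PORT B =====
-- the 'for x in primero' loop of Source B, carrying the counter 'comunes'
def similitudAltLoop (resto : List (List Int)) : List Int → Int → Bool
  | [], _ => false
  | x :: xs, comunes =>
    if resto.all (fun c => c.contains x) then
      if comunes + 1 == 2 then true
      else similitudAltLoop resto xs (comunes + 1)
    else similitudAltLoop resto xs comunes

def similitud_media_alt (conjuntos : List (List Int)) : Bool :=
  match conjuntos with
  | [] => false  -- conjuntos[0] raises IndexError here; excluded by Pre_
  | primero :: resto => similitudAltLoop resto primero 0

-- ===== PRECONDITION & SPEC =====
-- The parameter is a Python list of SETS of ints: the input is nonempty (on [] both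
-- programs raise IndexError at conjuntos[0]) and each inner list is a set
-- representation, i.e. holds distinct elements.
def Pre_similitud_media (conjuntos : List (List Int)) : Prop :=
  conjuntos ≠ [] ∧ ∀ s ∈ conjuntos, s.Nodup
instance (conjuntos : List (List Int)) : Decidable (Pre_similitud_media conjuntos) := by
  unfold Pre_similitud_media; infer_instance
def pvWitness_similitud_media : List (List Int) := [[1, 2, 3], [2, 3, 4]]

def Spec_similitud_media (conjuntos : List (List Int)) (out : Bool) : Prop := out = similitud_media_alt conjuntos
instance (conjuntos : List (List Int)) (out : Bool) : Decidable (Spec_similitud_media conjuntos out) := by unfold Spec_similitud_media; infer_instance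

-- ===== CLAIM (what is proved, stated in full; the proofs are below) =====
def Claim_equal_similitud_media : Prop := ∀ (conjuntos : List (List Int)), Dom_similitud_media conjuntos → Pre_similitud_media conjuntos → Spec_similitud_media conjuntos (similitud_media conjuntos)

-- ===== LEMMAS AND PROOFS =====

-- Folding pairwise intersections = filtering the accumulator by membership in every set.
theorem foldl_inter_eq_filter (resto : List (List Int)) (s : PySem.Set Int) :
    resto.foldl (fun acc conjunto => PySem.Set.inter acc conjunto) s
      = s.filter (fun x => resto.all (fun c => c.contains x)) := by
  induction resto generalizing s with
  | nil => simp
  | cons c cs ih =>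
    rw [List.foldl_cons, ih, PySem.Set.inter, List.filter_filter]
    apply List.filter_congr
    intro x _
    simp [List.all_cons, Bool.and_comm]

-- The counting loop decides '2 <= comunes + number of remaining common elements'.
theorem similitudAltLoop_eq (resto : List (List Int)) (xs : List Int) (comunes : Int)
    (h0 : 0 ≤ comunes) (h1 : comunes ≤ 1) :
    similitudAltLoop resto xs comunes
      = decide (2 ≤ comunes + (xs.filter (fun x => resto.all (fun c => c.contains x))).length) := by
  induction xs generalizing comunes with
  | nil =>
    simp only [similitudAltLoop, List.filter_nil, List.length_nil]
    symm
    simp only [decide_eq_false_iff_not]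
    push_cast
    omega
  | cons x xs ih =>
    simp only [similitudAltLoop, List.filter_cons]
    by_cases hp : (resto.all (fun c => c.contains x)) = true
    · rw [if_pos hp, if_pos hp, List.length_cons]
      by_cases h2 : (comunes + 1 == 2) = true
      · rw [beq_iff_eq] at h2
        rw [if_pos (by rw [beq_iff_eq]; omega)]
        symm
        simp only [decide_eq_true_eq]
        have := Int.natCast_nonneg (xs.filter (fun x => resto.all (fun c => c.contains x))).length
        push_cast
        omega
      · have hc : ¬ comunes + 1 = 2 := fun h => h2 (by rw [beq_iff_eq]; exact h)
        rw [if_neg h2, ih (comunes + 1) (by omega) (by omega)]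
        simp only [decide_eq_decide]
        push_cast
        omega
    · rw [if_neg hp, if_neg hp]
      exact ih comunes h0 h1

theorem similitud_media_spec_aux (primero : List Int) (resto : List (List Int))
    (hnd : primero.Nodup) :
    similitud_media (primero :: resto) = similitud_media_alt (primero :: resto) := by
  simp only [similitud_media, similitud_media_alt]
  rw [foldl_inter_eq_filter, PySem.Set.ofList_eq_self_of_nodup _ hnd,
      similitudAltLoop_eq resto primero 0 (by omega) (by omega)]
  simp [PySem.Set.len]

-- ===== VERDICT (by name: the statement is the Claim_ definition above) =====
theorem similitud_media_spec : Claim_equal_similitud_media := by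
  intro conjuntos _ hpre
  unfold Spec_similitud_media
  match conjuntos with
  | [] => exact absurd rfl hpre.1
  | primero :: resto =>
    exact similitud_media_spec_aux primero resto (hpre.2 primero (by simp))
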